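-- pv_equiv track=rewrite | github.com/DaniElectra/libcipher | libcipher/core.py | letter_arrangement
-- ===== SOURCE A (Python) =====
-- def letter_arrangement(string: str, offset: int, undo: bool, numbers: bool, key: str) -> str:
--     '''Apply letter arrangement to string based on offset'''
--     UppercaseList = [ 'A', 'B', 'C',
--                       'D', 'E', 'F',
--                       'G', 'H', 'I',
--                       'J', 'K', 'L',
--                       'M', 'N', 'O',
--                       'P', 'Q', 'R',
--                       'S', 'T', 'U',
--                       'V', 'W', 'X',
--                       'Y', 'Z' ]
--
--     LowercaseList = [ 'a', 'b', 'c',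
--                       'd', 'e', 'f',
--                       'g', 'h', 'i',
--                       'j', 'k', 'l',
--                       'm', 'n', 'o',
--                       'p', 'q', 'r',
--                       's', 't', 'u',
--                       'v', 'w', 'x',
--                       'y', 'z' ]
--
--     new_string = ''
--     key_letter_count = 0
--     key_offset = 0
--
--     for letter in string:
--         # If there's a key assigned, extract it's offset value
--         if key != "":
--             # Keep a count for extracting the key letters,
--             # and reset it when we reach the end of the key
--             if key_letter_count >= len(key):
--                 key_letter_count = 0
--
--             # Extract the key letter
--             letter_key = key[key_letter_count]
--
--             # Check the letter offset in lists
--             if letter_key in UppercaseList: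
--                 key_offset = UppercaseList.index(letter_key)
--
--             if letter_key in LowercaseList:
--                 key_offset = LowercaseList.index(letter_key)
--
--             key_letter_count += 1
--
--         # Search if letter exists in lists
--         if letter in UppercaseList:
--             if undo:
--                 letter_number = UppercaseList.index(letter) - offset - key_offset
--             else:
--                 letter_number = UppercaseList.index(letter) + offset + key_offset
--
--             # Check if letter offset bypasses list limits
--             while letter_number >= len(UppercaseList):
--                 letter_number -= len(UppercaseList)
--
--             while letter_number < 0:
--                 letter_number += len(UppercaseList)
--
--             new_string += UppercaseList[letter_number]
--             continue
--
--         if letter in LowercaseList: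
--             if undo:
--                 letter_number = LowercaseList.index(letter) - offset - key_offset
--             else:
--                 letter_number = LowercaseList.index(letter) + offset + key_offset
--
--             # Check if letter offset bypasses list limits
--             while letter_number >= len(LowercaseList):
--                 letter_number -= len(LowercaseList)
--
--             while letter_number < 0:
--                 letter_number += len(LowercaseList)
--
--             new_string += LowercaseList[letter_number]
--             continue
--
--         # Check if applying number arrangement
--         if letter.isnumeric() and numbers == True:
--             if undo:
--                 new_number = int(letter) + offset
--             else:
--                 new_number = int(letter) - offset
--
--             # Make number only one digit
--             while new_number >= 10:
--                 new_number -= 10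
--
--             while new_number < 0:
--                 new_number += 10
--
--             new_string += str(new_number)
--             continue
--
--         # If it's a non-listed character, pass it directly
--         new_string += letter
--     return new_string
-- ===== SOURCE B (Python) =====
-- def letter_arrangement(string: str, offset: int, undo: bool, numbers: bool, key: str) -> str:
--     '''Apply letter arrangement to string based on offset'''
--     sign = -1 if undo else 1
--
--     # Pass 1: key schedule — one shift value per input position; a non-letter
--     # key character carries the previous value forward (0 before any letter).
--     ks = []
--     k = 0
--     for i in range(len(string)):
--         if key:
--             c = key[i % len(key)]
--             if 'A' <= c <= 'Z':
--                 k = ord(c) - 65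
--             elif 'a' <= c <= 'z':
--                 k = ord(c) - 97
--         ks.append(k)
--
--     # Pass 2: one full translation table per distinct key offset (at most 26),
--     # built once; digits shift by the plain offset only, with opposite sign.
--     tables = {}
--     for k in ks:
--         if k not in tables:
--             s = sign * (offset + k) % 26
--             t = {}
--             for i in range(26):
--                 t[chr(65 + i)] = chr(65 + (i + s) % 26)
--                 t[chr(97 + i)] = chr(97 + (i + s) % 26)
--             if numbers:
--                 d = -sign * offset % 10
--                 for i in range(10):
--                     t[chr(48 + i)] = chr(48 + (i + d) % 10)
--             tables[k] = t
--
--     # Pass 3: branch-free lookups (non-listed characters pass through).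
--     return ''.join(tables[k].get(ch, ch) for ch, k in zip(string, ks))
-- ===== Notes on version B (the rewrite author's own statement) =====
-- stated objective: faster
-- what changed: Replaced A's single pass of per-character alphabet-list membership/index scans and step-by-26/10 while-loop wraparound by three staged passes: a key-schedule pass, precomputed per-key-offset translation dictionaries (at most 26, built once with %), and a final branch-free dict-lookup pass.
import Mathlib
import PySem

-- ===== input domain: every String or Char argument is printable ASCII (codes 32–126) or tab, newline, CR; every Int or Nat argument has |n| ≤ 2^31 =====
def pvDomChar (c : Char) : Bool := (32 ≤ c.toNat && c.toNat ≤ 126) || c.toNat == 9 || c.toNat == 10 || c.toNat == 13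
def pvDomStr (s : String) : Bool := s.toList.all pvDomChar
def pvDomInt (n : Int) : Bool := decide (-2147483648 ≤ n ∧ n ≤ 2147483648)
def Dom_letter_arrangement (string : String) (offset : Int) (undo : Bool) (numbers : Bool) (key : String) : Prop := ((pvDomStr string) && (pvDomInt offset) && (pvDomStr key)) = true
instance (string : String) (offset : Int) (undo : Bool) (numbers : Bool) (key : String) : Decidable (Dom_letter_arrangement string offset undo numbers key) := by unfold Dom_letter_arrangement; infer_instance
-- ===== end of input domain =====

-- B replaces A's single pass (per-character alphabet-list scans and while-loop wraparound) by
-- a key-schedule pass, precomputed translation dictionaries (one per distinct key offset),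
-- and a branch-free lookup pass (objective: faster, no per-character index scans or step-by-26 loops).

-- ===== PORT A =====
def pvUpperA : List Char := ['A','B','C','D','E','F','G','H','I','J','K','L','M','N','O','P','Q','R','S','T','U','V','W','X','Y','Z']
def pvLowerA : List Char := ['a','b','c','d','e','f','g','h','i','j','k','l','m','n','o','p','q','r','s','t','u','v','w','x','y','z']

-- 'while letter_number >= 26: letter_number -= 26'
def pvWrapDown26 (n : Int) : Int := if 26 ≤ n then pvWrapDown26 (n - 26) else n
  termination_by n.toNat
  decreasing_by omega
-- 'while letter_number < 0: letter_number += 26'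
def pvWrapUp26 (n : Int) : Int := if n < 0 then pvWrapUp26 (n + 26) else n
  termination_by (-n).toNat
  decreasing_by omega
-- 'while new_number >= 10: new_number -= 10'
def pvWrapDown10 (n : Int) : Int := if 10 ≤ n then pvWrapDown10 (n - 10) else n
  termination_by n.toNat
  decreasing_by omega
-- 'while new_number < 0: new_number += 10'
def pvWrapUp10 (n : Int) : Int := if n < 0 then pvWrapUp10 (n + 10) else n
  termination_by (-n).toNat
  decreasing_by omega

-- A's 'if key != ""' block: (new key_letter_count, new key_offset) from the current state;
-- 'key[key_letter_count]' is read with getD — it is in range after the reset A performs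
def pvKeyPartA (key : List Char) (cnt : Nat) (k : Int) : Nat × Int :=
  if key ≠ [] then
    ((if key.length ≤ cnt then 0 else cnt) + 1,
     if key.getD (if key.length ≤ cnt then 0 else cnt) ' ' ∈ pvLowerA then
       (((PySem.List.index? pvLowerA (key.getD (if key.length ≤ cnt then 0 else cnt) ' ')).getD 0 : Nat) : Int)
     else if key.getD (if key.length ≤ cnt then 0 else cnt) ' ' ∈ pvUpperA then
       (((PySem.List.index? pvUpperA (key.getD (if key.length ≤ cnt then 0 else cnt) ' ')).getD 0 : Nat) : Int)
     else k)
  else (cnt, k)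

-- the character each branch of A's loop body appends (each branch appends exactly one char);
-- 'letter.isnumeric()' is, on the printable-ASCII domain, exactly '0' ≤ letter ≤ '9';
-- 'int(letter)' is ord - 48 and 'str(new_number)' (one digit) is the digit's character
def pvCharA (offset : Int) (undo : Bool) (numbers : Bool) (koff : Int) (letter : Char) : Char :=
  if letter ∈ pvUpperA then
    pvUpperA.getD (pvWrapUp26 (pvWrapDown26
      (if undo then (((PySem.List.index? pvUpperA letter).getD 0 : Nat) : Int) - offset - koff
       else (((PySem.List.index? pvUpperA letter).getD 0 : Nat) : Int) + offset + koff))).toNat ' '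
  else if letter ∈ pvLowerA then
    pvLowerA.getD (pvWrapUp26 (pvWrapDown26
      (if undo then (((PySem.List.index? pvLowerA letter).getD 0 : Nat) : Int) - offset - koff
       else (((PySem.List.index? pvLowerA letter).getD 0 : Nat) : Int) + offset + koff))).toNat ' '
  else if (48 ≤ letter.toNat ∧ letter.toNat ≤ 57) ∧ numbers = true then
    Char.ofNat (48 + (pvWrapUp10 (pvWrapDown10
      (if undo then ((letter.toNat : Int) - 48) + offset
       else ((letter.toNat : Int) - 48) - offset))).toNat)
  else letter

-- one iteration of A's 'for letter in string' loop; state = (new_string, key_letter_count, key_offset)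
def pvStepA (offset : Int) (undo : Bool) (numbers : Bool) (key : List Char)
    (st : List Char × Nat × Int) (letter : Char) : List Char × Nat × Int :=
  (st.1 ++ [pvCharA offset undo numbers (pvKeyPartA key st.2.1 st.2.2).2 letter],
   (pvKeyPartA key st.2.1 st.2.2).1, (pvKeyPartA key st.2.1 st.2.2).2)

def letter_arrangement (string : String) (offset : Int) (undo : Bool) (numbers : Bool) (key : String) : String :=
  String.ofList ((string.toList.foldl (pvStepA offset undo numbers key.toList) ([], 0, 0)).1)

-- ===== PORT B =====
-- pass 1 of Source B: one key offset per input position, previous offset carried over non-letter key chars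
def pvKeyStep (key : List Char) (st : List Int × Int) (i : Nat) : List Int × Int :=
  let k :=
    if key ≠ [] then
      if 65 ≤ (key.getD (i % key.length) ' ').toNat ∧ (key.getD (i % key.length) ' ').toNat ≤ 90 then
        (((key.getD (i % key.length) ' ').toNat : Int) - 65)
      else if 97 ≤ (key.getD (i % key.length) ' ').toNat ∧ (key.getD (i % key.length) ' ').toNat ≤ 122 then
        (((key.getD (i % key.length) ' ').toNat : Int) - 97)
      else st.2
    else st.2
  (st.1 ++ [k], k)

-- pass 2 of Source B: one translation dict per distinct key offset ('chr(65+i)' is Char.ofNat …)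
def pvMakeTable (sign offset k : Int) (numbers : Bool) : PySem.Dict Char Char :=
  let s := PySem.Int.mod (sign * (offset + k)) 26
  let t := (PySem.List.pyRange 0 26 1).foldl
    (fun (t : PySem.Dict Char Char) i =>
      (t.insert (Char.ofNat (65 + i).toNat) (Char.ofNat (65 + PySem.Int.mod (i + s) 26).toNat)).insert
        (Char.ofNat (97 + i).toNat) (Char.ofNat (97 + PySem.Int.mod (i + s) 26).toNat))
    PySem.Dict.empty
  if numbers then
    let d := PySem.Int.mod ((-sign) * offset) 10
    (PySem.List.pyRange 0 10 1).foldl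
      (fun (t : PySem.Dict Char Char) i =>
        t.insert (Char.ofNat (48 + i).toNat) (Char.ofNat (48 + PySem.Int.mod (i + d) 10).toNat)) t
  else t

-- 'for k in ks: if k not in tables: tables[k] = …'
def pvTables (sign offset : Int) (numbers : Bool) (ks : List Int) : PySem.Dict Int (PySem.Dict Char Char) :=
  ks.foldl (fun tb k => if tb.contains k then tb else tb.insert k (pvMakeTable sign offset k numbers))
    PySem.Dict.empty

-- pass 3 of Source B: 'tables[k].get(ch, ch)'; tables[k] is present for every k in ks by
-- construction of pass 2, so the getD default dict is never consulted
def letter_arrangement_alt (string : String) (offset : Int) (undo : Bool) (numbers : Bool) (key : String) : String :=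
  let sign : Int := if undo then -1 else 1
  let ks := ((List.range string.toList.length).foldl (pvKeyStep key.toList) ([], 0)).1
  let tables := pvTables sign offset numbers ks
  String.ofList (List.zipWith
    (fun ch k => ((((tables.get? k).getD PySem.Dict.empty).get? ch).getD ch)) string.toList ks)

-- ===== PRECONDITION & SPEC =====
def Spec_letter_arrangement (string : String) (offset : Int) (undo : Bool) (numbers : Bool) (key : String) (out : String) : Prop := out = letter_arrangement_alt string offset undo numbers key
instance (string : String) (offset : Int) (undo : Bool) (numbers : Bool) (key : String) (out : String) : Decidable (Spec_letter_arrangement string offset undo numbers key out) := by unfold Spec_letter_arrangement; infer_instance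

-- ===== CLAIM (what is proved, stated in full; the proofs are below) =====
def Claim_equal_letter_arrangement : Prop := ∀ (string : String) (offset : Int) (undo : Bool) (numbers : Bool) (key : String), Dom_letter_arrangement string offset undo numbers key → Spec_letter_arrangement string offset undo numbers key (letter_arrangement string offset undo numbers key)

-- ===== LEMMAS AND PROOFS =====

-- the common per-character shift both ports are reduced to (proof-side only)
def pvShiftB (offset : Int) (undo : Bool) (numbers : Bool) (ch : Char) (k : Int) : Char :=
  if 65 ≤ ch.toNat ∧ ch.toNat ≤ 90 then
    Char.ofNat (65 + PySem.Int.mod ((ch.toNat : Int) - 65 + (if undo then (-1:Int) else 1) * (offset + k)) 26).toNat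
  else if 97 ≤ ch.toNat ∧ ch.toNat ≤ 122 then
    Char.ofNat (97 + PySem.Int.mod ((ch.toNat : Int) - 97 + (if undo then (-1:Int) else 1) * (offset + k)) 26).toNat
  else if (48 ≤ ch.toNat ∧ ch.toNat ≤ 57) ∧ numbers = true then
    Char.ofNat (48 + PySem.Int.mod ((ch.toNat : Int) - 48 + (-(if undo then (-1:Int) else 1)) * offset) 10).toNat
  else ch

theorem pv_down26 (n : Int) : pvWrapDown26 n = if 26 ≤ n then n % 26 else n := by
  induction n using pvWrapDown26.induct with
  | case1 n h ih =>
    rw [pvWrapDown26, if_pos h, ih]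
    have : (n - 26) % 26 = n % 26 := by omega
    split_ifs <;> omega
  | case2 n h => rw [pvWrapDown26, if_neg h, if_neg h]

theorem pv_up26 (n : Int) : pvWrapUp26 n = if n < 0 then n % 26 else n := by
  induction n using pvWrapUp26.induct with
  | case1 n h ih =>
    rw [pvWrapUp26, if_pos h, ih]
    have : (n + 26) % 26 = n % 26 := by omega
    split_ifs <;> omega
  | case2 n h => rw [pvWrapUp26, if_neg h, if_neg h]

theorem pv_norm26 (n : Int) : pvWrapUp26 (pvWrapDown26 n) = n % 26 := by
  rw [pv_down26, pv_up26]
  have h1 := Int.emod_nonneg n (by norm_num : (26:Int) ≠ 0)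
  have h2 := Int.emod_lt_of_pos n (by norm_num : (0:Int) < 26)
  split_ifs <;> omega

theorem pv_down10 (n : Int) : pvWrapDown10 n = if 10 ≤ n then n % 10 else n := by
  induction n using pvWrapDown10.induct with
  | case1 n h ih =>
    rw [pvWrapDown10, if_pos h, ih]
    have : (n - 10) % 10 = n % 10 := by omega
    split_ifs <;> omega
  | case2 n h => rw [pvWrapDown10, if_neg h, if_neg h]

theorem pv_up10 (n : Int) : pvWrapUp10 n = if n < 0 then n % 10 else n := by
  induction n using pvWrapUp10.induct with
  | case1 n h ih =>
    rw [pvWrapUp10, if_pos h, ih]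
    have : (n + 10) % 10 = n % 10 := by omega
    split_ifs <;> omega
  | case2 n h => rw [pvWrapUp10, if_neg h, if_neg h]

theorem pv_norm10 (n : Int) : pvWrapUp10 (pvWrapDown10 n) = n % 10 := by
  rw [pv_down10, pv_up10]
  have h1 := Int.emod_nonneg n (by norm_num : (10:Int) ≠ 0)
  have h2 := Int.emod_lt_of_pos n (by norm_num : (0:Int) < 10)
  split_ifs <;> omega

theorem pv_char_eq_iff (a b : Char) : a = b ↔ a.toNat = b.toNat := by
  constructor
  · intro h; rw [h]
  · intro h; exact Char.ext (by simpa [Char.toNat] using UInt32.toNat_inj.mp h)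

theorem pv_memU (c : Char) : c ∈ pvUpperA ↔ (65 ≤ c.toNat ∧ c.toNat ≤ 90) := by
  constructor
  · intro h; fin_cases h <;> exact ⟨by decide, by decide⟩
  · rintro ⟨h1, h2⟩
    have hc : c = Char.ofNat c.toNat := (Char.ofNat_toNat c).symm
    interval_cases h : c.toNat <;> simp [hc, pvUpperA]

theorem pv_memL (c : Char) : c ∈ pvLowerA ↔ (97 ≤ c.toNat ∧ c.toNat ≤ 122) := by
  constructor
  · intro h; fin_cases h <;> exact ⟨by decide, by decide⟩
  · rintro ⟨h1, h2⟩
    have hc : c = Char.ofNat c.toNat := (Char.ofNat_toNat c).symm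
    interval_cases h : c.toNat <;> simp [hc, pvLowerA]

theorem pv_idxU (c : Char) (h : c ∈ pvUpperA) : PySem.List.index? pvUpperA c = some (c.toNat - 65) := by
  fin_cases h <;> decide

theorem pv_idxL (c : Char) (h : c ∈ pvLowerA) : PySem.List.index? pvLowerA c = some (c.toNat - 97) := by
  fin_cases h <;> decide

theorem pv_tblU (j : Nat) (h : j < 26) : pvUpperA.getD j ' ' = Char.ofNat (65 + j) := by
  interval_cases j <;> rfl

theorem pv_tblL (j : Nat) (h : j < 26) : pvLowerA.getD j ' ' = Char.ofNat (97 + j) := by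
  interval_cases j <;> rfl

-- A's loop body appends exactly the character pvShiftB produces, for the same key offset
theorem pv_charA_eq (offset : Int) (undo : Bool) (numbers : Bool) (koff : Int) (c : Char) :
    pvCharA offset undo numbers koff c = pvShiftB offset undo numbers c koff := by
  have hm26 : ∀ x : Int, PySem.Int.mod x 26 = x % 26 :=
    fun x => PySem.Int.mod_eq_emod_of_pos (by norm_num)
  have hm10 : ∀ x : Int, PySem.Int.mod x 10 = x % 10 :=
    fun x => PySem.Int.mod_eq_emod_of_pos (by norm_num)
  unfold pvCharA pvShiftB
  cases undo <;>
    simp only [Bool.false_eq_true, ↓reduceIte, pv_memU, pv_memL, hm26, hm10] <;>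
    split_ifs with h1 h2 h3 <;> try rfl
  case _ =>  -- uppercase, not undo
    have hb1 : 65 ≤ c.toNat := h1.1
    rw [pv_idxU c ((pv_memU c).mpr h1)]
    simp only [Option.getD_some, pv_norm26]
    have hmb : (((c.toNat - 65 : Nat) : Int) + offset + koff)
        = ((c.toNat : Int) - 65 + 1 * (offset + koff)) := by push_cast [hb1]; ring
    rw [hmb]
    set m := ((c.toNat : Int) - 65 + 1 * (offset + koff))
    have hn1 := Int.emod_nonneg m (by norm_num : (26:Int) ≠ 0)
    have hn2 := Int.emod_lt_of_pos m (by norm_num : (0:Int) < 26)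
    rw [pv_tblU (m % 26).toNat (by omega)]
    congr 1; omega
  case _ =>  -- lowercase, not undo
    have hb1 : 97 ≤ c.toNat := h2.1
    rw [pv_idxL c ((pv_memL c).mpr h2)]
    simp only [Option.getD_some, pv_norm26]
    have hmb : (((c.toNat - 97 : Nat) : Int) + offset + koff)
        = ((c.toNat : Int) - 97 + 1 * (offset + koff)) := by push_cast [hb1]; ring
    rw [hmb]
    set m := ((c.toNat : Int) - 97 + 1 * (offset + koff))
    have hn1 := Int.emod_nonneg m (by norm_num : (26:Int) ≠ 0)
    have hn2 := Int.emod_lt_of_pos m (by norm_num : (0:Int) < 26)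
    rw [pv_tblL (m % 26).toNat (by omega)]
    congr 1; omega
  case _ =>  -- digit, not undo
    simp only [pv_norm10]
    set m := ((c.toNat : Int) - 48 - offset) with hm
    have hmb : ((c.toNat : Int) - 48 + (-(1:Int)) * offset) = m := by rw [hm]; ring
    rw [hmb]
    have hn1 := Int.emod_nonneg m (by norm_num : (10:Int) ≠ 0)
    have hn2 := Int.emod_lt_of_pos m (by norm_num : (0:Int) < 10)
    congr 1; omega
  case _ =>  -- uppercase, undo
    have hb1 : 65 ≤ c.toNat := h1.1
    rw [pv_idxU c ((pv_memU c).mpr h1)]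
    simp only [Option.getD_some, pv_norm26]
    have hmb : (((c.toNat - 65 : Nat) : Int) - offset - koff)
        = ((c.toNat : Int) - 65 + (-1) * (offset + koff)) := by push_cast [hb1]; ring
    rw [hmb]
    set m := ((c.toNat : Int) - 65 + (-1) * (offset + koff))
    have hn1 := Int.emod_nonneg m (by norm_num : (26:Int) ≠ 0)
    have hn2 := Int.emod_lt_of_pos m (by norm_num : (0:Int) < 26)
    rw [pv_tblU (m % 26).toNat (by omega)]
    congr 1; omega
  case _ =>  -- lowercase, undo
    have hb1 : 97 ≤ c.toNat := h2.1
    rw [pv_idxL c ((pv_memL c).mpr h2)]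
    simp only [Option.getD_some, pv_norm26]
    have hmb : (((c.toNat - 97 : Nat) : Int) - offset - koff)
        = ((c.toNat : Int) - 97 + (-1) * (offset + koff)) := by push_cast [hb1]; ring
    rw [hmb]
    set m := ((c.toNat : Int) - 97 + (-1) * (offset + koff))
    have hn1 := Int.emod_nonneg m (by norm_num : (26:Int) ≠ 0)
    have hn2 := Int.emod_lt_of_pos m (by norm_num : (0:Int) < 26)
    rw [pv_tblL (m % 26).toNat (by omega)]
    congr 1; omega
  case _ =>  -- digit, undo
    simp only [pv_norm10]
    set m := ((c.toNat : Int) - 48 + offset) with hm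
    have hmb : ((c.toNat : Int) - 48 + (-(-1:Int)) * offset) = m := by rw [hm]; ring
    rw [hmb]
    have hn1 := Int.emod_nonneg m (by norm_num : (10:Int) ≠ 0)
    have hn2 := Int.emod_lt_of_pos m (by norm_num : (0:Int) < 10)
    congr 1; omega

-- the key offset produced for position i (proof-side description of both programs' key handling)
def pvNextK (key : List Char) (k : Int) (i : Nat) : Int :=
  if key ≠ [] then
    if 65 ≤ (key.getD (i % key.length) ' ').toNat ∧ (key.getD (i % key.length) ' ').toNat ≤ 90 then
      (((key.getD (i % key.length) ' ').toNat : Int) - 65)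
    else if 97 ≤ (key.getD (i % key.length) ' ').toNat ∧ (key.getD (i % key.length) ' ').toNat ≤ 122 then
      (((key.getD (i % key.length) ' ').toNat : Int) - 97)
    else k
  else k

-- the keystream from position i, length n, carried offset k
def pvSpecKS (key : List Char) (k : Int) (i n : Nat) : List Int :=
  match n with
  | 0 => []
  | n + 1 => pvNextK key k i :: pvSpecKS key (pvNextK key k i) (i + 1) n

theorem pv_keystep (key : List Char) (st : List Int × Int) (i : Nat) :
    pvKeyStep key st i = (st.1 ++ [pvNextK key st.2 i], pvNextK key st.2 i) := rfl

theorem pv_ks_spec (key : List Char) :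
    ∀ (n i : Nat) (acc : List Int) (k : Int),
      ((List.range' i n).foldl (pvKeyStep key) (acc, k)).1 = acc ++ pvSpecKS key k i n := by
  intro n
  induction n with
  | zero => intro i acc k; simp [pvSpecKS]
  | succ n ih =>
    intro i acc k
    rw [List.range'_succ, List.foldl_cons, pv_keystep]
    rw [ih (i + 1) (acc ++ [pvNextK key k i]) (pvNextK key k i)]
    simp [pvSpecKS]

-- A's key-block update equals pvNextK with the incremented count, given the count invariant
theorem pv_keyupd (key : List Char) (hk : key ≠ []) (cnt : Nat) (k : Int) (i : Nat)
    (hc : (if key.length ≤ cnt then 0 else cnt) = i % key.length) :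
    pvKeyPartA key cnt k = (i % key.length + 1, pvNextK key k i) := by
  unfold pvKeyPartA pvNextK
  rw [if_pos hk, if_pos hk, hc]
  refine Prod.ext rfl ?_
  simp only [pv_memU, pv_memL]
  split_ifs with h1 h2 h2 <;> try rfl
  · exfalso
    have ha : 97 ≤ (key.getD (i % key.length) ' ').toNat := h1.1
    have hb : (key.getD (i % key.length) ' ').toNat ≤ 90 := h2.2
    omega
  · rw [pv_idxL _ ((pv_memL _).mpr h1)]
    have hb1 : 97 ≤ (key.getD (i % key.length) ' ').toNat := h1.1
    simp only [Option.getD_some]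
    omega
  · rw [pv_idxU _ ((pv_memU _).mpr h2)]
    have hb1 : 65 ≤ (key.getD (i % key.length) ' ').toNat := h2.1
    simp only [Option.getD_some]
    omega

theorem pv_keypart_nil (cnt : Nat) (k : Int) : pvKeyPartA [] cnt k = (cnt, k) := rfl

-- after using index i % len and storing i % len + 1, the next reset yields (i+1) % len
theorem pv_cnt_step (l i : Nat) (hl : 0 < l) :
    (if l ≤ i % l + 1 then 0 else i % l + 1) = (i + 1) % l := by
  have h2 : i % l < l := Nat.mod_lt _ hl
  rcases Nat.lt_or_ge (i % l + 1) l with h1 | h1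
  · rw [if_neg (by omega)]
    conv_rhs => rw [← Nat.mod_add_div i l]
    rw [Nat.add_right_comm, Nat.add_mul_mod_self_left, Nat.mod_eq_of_lt h1]
  · rw [if_pos (by omega)]
    conv_rhs => rw [← Nat.mod_add_div i l]
    rw [Nat.add_right_comm, Nat.add_mul_mod_self_left]
    have : i % l + 1 = l := by omega
    simp [this]

theorem pv_aloop (offset : Int) (undo : Bool) (numbers : Bool) (key : List Char) :
    ∀ (s : List Char) (i : Nat) (acc : List Char) (cnt : Nat) (k : Int),
      (key ≠ [] → (if key.length ≤ cnt then 0 else cnt) = i % key.length) →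
      (s.foldl (pvStepA offset undo numbers key) (acc, cnt, k)).1
        = acc ++ List.zipWith (pvShiftB offset undo numbers) s (pvSpecKS key k i s.length) := by
  intro s
  induction s with
  | nil => intro i acc cnt k _; simp [pvSpecKS]
  | cons c s ih =>
    intro i acc cnt k hc
    by_cases hk : key = []
    · subst hk
      have hnk : pvNextK [] k i = k := rfl
      have hstep : pvStepA offset undo numbers [] (acc, cnt, k) c
          = (acc ++ [pvCharA offset undo numbers k c], cnt, k) := by
        simp [pvStepA, pv_keypart_nil]
      rw [List.foldl_cons, hstep, ih (i + 1) _ cnt k (fun h => absurd rfl h)]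
      simp [pvSpecKS, hnk, pv_charA_eq, List.append_assoc]
    · have hl : 0 < key.length := List.length_pos_of_ne_nil hk
      have hstep : pvStepA offset undo numbers key (acc, cnt, k) c
          = (acc ++ [pvCharA offset undo numbers (pvNextK key k i) c],
             i % key.length + 1, pvNextK key k i) := by
        simp [pvStepA, pv_keyupd key hk cnt k i (hc hk)]
      rw [List.foldl_cons, hstep,
          ih (i + 1) _ (i % key.length + 1) (pvNextK key k i)
            (fun _ => pv_cnt_step key.length i hl)]
      simp [pvSpecKS, pv_charA_eq, List.append_assoc]

-- ===== B-side lemmas: the tables =====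

-- (Char.ofNat n).toNat = n on the small codes the tables use
theorem pv_toNat_ofNat (n : Nat) (h : n < 55296) : (Char.ofNat n).toNat = n := by
  unfold Char.ofNat
  split
  · rename_i hv
    show (Char.ofNatAux n hv).val.toNat = n
    simp [Char.ofNatAux]
  · rename_i hv; exact absurd (Or.inl (by omega)) hv

-- lookup in the letter part of a translation table, by induction on the range
theorem pv_letter_fold_get (u l : Nat → Char) (n : Nat) (hn : n ≤ 26) :
    ∀ (d : PySem.Dict Char Char) (ch : Char),
      ((List.range n).foldl
        (fun t j => (t.insert (Char.ofNat (65 + j)) (u j)).insert (Char.ofNat (97 + j)) (l j)) d).get? ch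
      = if 65 ≤ ch.toNat ∧ ch.toNat < 65 + n then some (u (ch.toNat - 65))
        else if 97 ≤ ch.toNat ∧ ch.toNat < 97 + n then some (l (ch.toNat - 97))
        else d.get? ch := by
  induction n with
  | zero =>
    intro d ch
    rw [List.range_zero, List.foldl_nil, if_neg (by omega), if_neg (by omega)]
  | succ n ih =>
    intro d ch
    have e65 : (Char.ofNat (65 + n)).toNat = 65 + n := pv_toNat_ofNat _ (by omega)
    have e97 : (Char.ofNat (97 + n)).toNat = 97 + n := pv_toNat_ofNat _ (by omega)
    rw [List.range_succ, List.foldl_append, List.foldl_cons, List.foldl_nil,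
        PySem.Dict.get?_insert, PySem.Dict.get?_insert, ih (by omega) d ch]
    simp only [pv_char_eq_iff, e65, e97]
    split_ifs <;> first
      | rfl
      | omega
      | (refine congrArg some (congrArg u ?_); omega)
      | (refine congrArg some (congrArg l ?_); omega)

-- lookup in the digit part of a translation table
theorem pv_digit_fold_get (u : Nat → Char) (n : Nat) (hn : n ≤ 10) :
    ∀ (d : PySem.Dict Char Char) (ch : Char),
      ((List.range n).foldl (fun t j => t.insert (Char.ofNat (48 + j)) (u j)) d).get? ch
      = if 48 ≤ ch.toNat ∧ ch.toNat < 48 + n then some (u (ch.toNat - 48))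
        else d.get? ch := by
  induction n with
  | zero =>
    intro d ch
    rw [List.range_zero, List.foldl_nil, if_neg (by omega)]
  | succ n ih =>
    intro d ch
    have e48 : (Char.ofNat (48 + n)).toNat = 48 + n := pv_toNat_ofNat _ (by omega)
    rw [List.range_succ, List.foldl_append, List.foldl_cons, List.foldl_nil,
        PySem.Dict.get?_insert, ih (by omega) d ch]
    simp only [pv_char_eq_iff, e48]
    split_ifs <;> first
      | rfl
      | omega
      | (refine congrArg some (congrArg u ?_); omega)

-- get? on a whole translation table, with the key-offset products abstracted
theorem pv_mk_get (sign offset k : Int) (numbers : Bool) (ch : Char) :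
    (pvMakeTable sign offset k numbers).get? ch =
      if 65 ≤ ch.toNat ∧ ch.toNat ≤ 90 then
        some (Char.ofNat (65 + PySem.Int.mod ((ch.toNat : Int) - 65 + sign * (offset + k)) 26).toNat)
      else if 97 ≤ ch.toNat ∧ ch.toNat ≤ 122 then
        some (Char.ofNat (97 + PySem.Int.mod ((ch.toNat : Int) - 97 + sign * (offset + k)) 26).toNat)
      else if (48 ≤ ch.toNat ∧ ch.toNat ≤ 57) ∧ numbers = true then
        some (Char.ofNat (48 + PySem.Int.mod ((ch.toNat : Int) - 48 + (-sign) * offset) 10).toNat)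
      else none := by
  have hr : PySem.List.pyRange 0 26 1 = (List.range 26).map (fun j : Nat => (j : Int)) := by decide
  have hr10 : PySem.List.pyRange 0 10 1 = (List.range 10).map (fun j : Nat => (j : Int)) := by decide
  have hm26 : ∀ x : Int, PySem.Int.mod x 26 = x % 26 :=
    fun x => PySem.Int.mod_eq_emod_of_pos (by norm_num)
  have hm10 : ∀ x : Int, PySem.Int.mod x 10 = x % 10 :=
    fun x => PySem.Int.mod_eq_emod_of_pos (by norm_num)
  unfold pvMakeTable
  dsimp only
  generalize sign * (offset + k) = g
  generalize (-sign) * offset = q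
  rw [hr, List.foldl_map]
  have hstep :
      (fun (t : PySem.Dict Char Char) (j : Nat) =>
        (t.insert (Char.ofNat (65 + (j : Int)).toNat)
            (Char.ofNat (65 + PySem.Int.mod ((j : Int) + PySem.Int.mod g 26) 26).toNat)).insert
          (Char.ofNat (97 + (j : Int)).toNat)
          (Char.ofNat (97 + PySem.Int.mod ((j : Int) + PySem.Int.mod g 26) 26).toNat))
      = (fun (t : PySem.Dict Char Char) (j : Nat) =>
        (t.insert (Char.ofNat (65 + j))
            ((fun j : Nat => Char.ofNat (65 + PySem.Int.mod ((j : Int) + PySem.Int.mod g 26) 26).toNat) j)).insert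
          (Char.ofNat (97 + j))
          ((fun j : Nat => Char.ofNat (97 + PySem.Int.mod ((j : Int) + PySem.Int.mod g 26) 26).toNat) j)) := by
    funext t j
    have h1 : ((65 : Int) + (j : Int)).toNat = 65 + j := by omega
    have h2 : ((97 : Int) + (j : Int)).toNat = 97 + j := by omega
    rw [h1, h2]
  cases numbers with
  | false =>
    rw [if_neg (by simp)]
    rw [hstep, pv_letter_fold_get _ _ 26 (by omega) PySem.Dict.empty ch, PySem.Dict.get?_empty]
    simp only [hm26, Bool.false_eq_true, and_false, if_false]
    split_ifs <;> first
      | rfl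
      | omega
      | (refine congrArg some (congrArg Char.ofNat ?_); omega)
  | true =>
    rw [if_pos rfl, hr10, List.foldl_map]
    have hstep10 :
        (fun (t : PySem.Dict Char Char) (j : Nat) =>
          t.insert (Char.ofNat (48 + (j : Int)).toNat)
            (Char.ofNat (48 + PySem.Int.mod ((j : Int) + PySem.Int.mod q 10) 10).toNat))
        = (fun (t : PySem.Dict Char Char) (j : Nat) =>
          t.insert (Char.ofNat (48 + j))
            ((fun j : Nat => Char.ofNat (48 + PySem.Int.mod ((j : Int) + PySem.Int.mod q 10) 10).toNat) j)) := by
      funext t j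
      have h1 : ((48 : Int) + (j : Int)).toNat = 48 + j := by omega
      rw [h1]
    rw [hstep10, pv_digit_fold_get _ 10 (by omega),
        hstep, pv_letter_fold_get _ _ 26 (by omega) PySem.Dict.empty ch, PySem.Dict.get?_empty]
    simp only [hm26, hm10, and_true]
    split_ifs <;> first
      | rfl
      | omega
      | (refine congrArg some (congrArg Char.ofNat ?_); omega)

-- looking a character up in the translation table for key offset k is pvShiftB
theorem pv_tbl_get (offset k : Int) (undo numbers : Bool) (ch : Char) :
    (((pvMakeTable (if undo then -1 else 1) offset k numbers).get? ch).getD ch)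
      = pvShiftB offset undo numbers ch k := by
  rw [pv_mk_get]
  unfold pvShiftB
  split_ifs <;> rfl

-- the tables dict holds exactly pvMakeTable for every key that occurred; first the invariant
-- that every stored value is the table of its key, then stability, then the lookup itself
def pvTbInv (sign offset : Int) (numbers : Bool) (tb : PySem.Dict Int (PySem.Dict Char Char)) : Prop :=
  ∀ j v, tb.get? j = some v → v = pvMakeTable sign offset j numbers

theorem pv_tb_step_inv (sign offset : Int) (numbers : Bool)
    (tb : PySem.Dict Int (PySem.Dict Char Char)) (a : Int)
    (h : pvTbInv sign offset numbers tb) :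
    pvTbInv sign offset numbers
      (if tb.contains a then tb else tb.insert a (pvMakeTable sign offset a numbers)) := by
  split_ifs with hca
  · exact h
  · intro j v hv
    rw [PySem.Dict.get?_insert] at hv
    split_ifs at hv with hj
    · subst hj; exact (Option.some_inj.mp hv).symm
    · exact h j v hv

theorem pv_tb_fold_pres (sign offset : Int) (numbers : Bool) (ks : List Int) :
    ∀ (tb : PySem.Dict Int (PySem.Dict Char Char)) (j : Int),
      tb.get? j = some (pvMakeTable sign offset j numbers) →
      (ks.foldl (fun tb k => if tb.contains k then tb
          else tb.insert k (pvMakeTable sign offset k numbers)) tb).get? j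
        = some (pvMakeTable sign offset j numbers) := by
  induction ks with
  | nil => intro tb j h; exact h
  | cons a l ih =>
    intro tb j h
    rw [List.foldl_cons]
    refine ih _ j ?_
    by_cases hca : tb.contains a = true
    · simpa [hca] using h
    · by_cases hj : j = a
      · subst hj; simp [hca, PySem.Dict.get?_insert_self]
      · simp only [hca, Bool.false_eq_true, if_false]
        rw [PySem.Dict.get?_insert, if_neg hj]
        exact h

theorem pv_tb_fold_get (sign offset : Int) (numbers : Bool) (k : Int) (ks : List Int) :
    ∀ (tb : PySem.Dict Int (PySem.Dict Char Char)), pvTbInv sign offset numbers tb → k ∈ ks →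
      (ks.foldl (fun tb k => if tb.contains k then tb
          else tb.insert k (pvMakeTable sign offset k numbers)) tb).get? k
        = some (pvMakeTable sign offset k numbers) := by
  induction ks with
  | nil => intro tb _ hk; simp at hk
  | cons a l ih =>
    intro tb hinv hk
    rw [List.foldl_cons]
    rcases List.mem_cons.mp hk with rfl | hk'
    · refine pv_tb_fold_pres sign offset numbers l _ k ?_
      by_cases hca : tb.contains k = true
      · have hca' := hca
        rw [PySem.Dict.contains_eq_isSome_get?] at hca'
        obtain ⟨v, hv⟩ := Option.isSome_iff_exists.mp hca'
        simp only [hca, if_true]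
        rw [hv, hinv k v hv]
      · simp only [hca, Bool.false_eq_true, if_false]
        rw [PySem.Dict.get?_insert_self]
    · exact ih _ (pv_tb_step_inv sign offset numbers tb a hinv) hk'

theorem pv_tables_get (sign offset : Int) (numbers : Bool) (ks : List Int) (k : Int)
    (hk : k ∈ ks) :
    (pvTables sign offset numbers ks).get? k = some (pvMakeTable sign offset k numbers) := by
  unfold pvTables
  refine pv_tb_fold_get sign offset numbers k ks PySem.Dict.empty ?_ hk
  intro j v hv
  rw [PySem.Dict.get?_empty] at hv
  exact absurd hv (by simp)

-- zipWith congruence over the members of the second list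
theorem pv_zip_congr (f g : Char → Int → Char) :
    ∀ (l1 : List Char) (l2 : List Int), (∀ b ∈ l2, ∀ a, f a b = g a b) →
      List.zipWith f l1 l2 = List.zipWith g l1 l2 := by
  intro l1
  induction l1 with
  | nil => intro l2 _; simp
  | cons a l ih =>
    intro l2 h
    cases l2 with
    | nil => simp
    | cons b l2 =>
      simp only [List.zipWith_cons_cons]
      rw [h b (by simp), ih l2 (fun x hx c => h x (by simp [hx]) c)]

-- ===== VERDICT (by name: the statement is the Claim_ definition above) =====
theorem letter_arrangement_spec : Claim_equal_letter_arrangement := by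
  intro string offset undo numbers key _
  unfold Spec_letter_arrangement letter_arrangement letter_arrangement_alt
  rw [List.range_eq_range', pv_ks_spec key.toList string.toList.length 0 [] 0, List.nil_append]
  rw [pv_aloop offset undo numbers key.toList string.toList 0 [] 0 0
      (fun h => by
        have : 0 < key.toList.length := List.length_pos_of_ne_nil h
        rw [if_neg (by omega), Nat.zero_mod])]
  rw [List.nil_append]
  congr 1
  refine (pv_zip_congr _ _ _ _ ?_).symm
  intro b hb a
  rw [pv_tables_get (if undo then -1 else 1) offset numbers _ b hb]
  simp only [Option.getD_some]
  exact pv_tbl_get offset b undo numbers a
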